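-- pv_equiv track=rewrite | github.com/sonnt3377/projecteuler | project_euler_21.py | find_amicable_pairs
-- ===== SOURCE A (Python) =====
-- def find_divisor_sum(number):
--     """
--     Find sum of all proper divisors of a number
--
--     :param number:
--     :return: sum of all proper divisors of that number
--     """
--     sum1 = 0
--     for i in range(1, number):
--         if number % i == 0:
--             # i is a divisor
--             sum1 += i
--     return sum1
--
-- def find_amicable_pairs(number):
--     """
--     Find all amicable pairs for numbers less than the number
--
--     :param number:
--     :return: a list of all amicable pairs
--     """
--
--     # Create a list containing sum of all proper divisors of i, with i ranging from 1 to n.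
--     # This list contains n items
--     list_of_sum = [find_divisor_sum(i) for i in range(1, number + 1)]
--
--     # 'pairs' is a list in which each component is an amicable pair
--     pairs = []
--
--     # Loop through 'list_of_sum' to find every amicable pairs
--     for i in range(1, number):
--         temp = list_of_sum[i]
--         # Check if there is any number that forms a pair with this 'temp' value
--         if (temp >= 1 and i + 1 < temp <= number and list_of_sum[temp - 1] == i + 1):
--             # Find the pair, add it to 'pairs'
--             pairs.append([i + 1, temp])
--
--     return pairs
-- ===== SOURCE B (Python) =====
-- def find_amicable_pairs(number):
--     """Divisor-sum sieve: for each d, add d to every proper multiple; then scan once for pairs."""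
--     if number < 1:
--         return []
--     sums = [0] * (number + 1)
--     for d in range(1, number // 2 + 1):
--         for m in range(2 * d, number + 1, d):
--             sums[m] += d
--     pairs = []
--     for a in range(2, number + 1):
--         s = sums[a]
--         if a < s <= number and sums[s] == a:
--             pairs.append([a, s])
--     return pairs
-- ===== Notes on version B (the rewrite author's own statement) =====
-- stated objective: faster
-- what changed: Replaces the per-number trial-division divisor sums (a quadratic double loop) with a single divisor-sum sieve that adds each d to all of its multiples, then one linear scan collects the amicable pairs.
import Mathlib
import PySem

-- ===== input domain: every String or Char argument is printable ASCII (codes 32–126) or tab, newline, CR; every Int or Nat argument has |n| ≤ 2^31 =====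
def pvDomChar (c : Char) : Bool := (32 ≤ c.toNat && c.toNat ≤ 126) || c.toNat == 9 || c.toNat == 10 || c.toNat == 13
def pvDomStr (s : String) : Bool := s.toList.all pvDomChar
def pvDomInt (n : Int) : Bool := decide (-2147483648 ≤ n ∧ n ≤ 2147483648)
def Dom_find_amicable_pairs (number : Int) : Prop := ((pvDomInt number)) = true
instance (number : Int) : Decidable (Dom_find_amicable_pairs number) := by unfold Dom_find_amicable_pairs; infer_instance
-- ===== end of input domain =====

-- B replaces A's per-number trial-division divisor sums by a single divisor-sum sieve
-- (each d is added to all of its proper multiples) followed by one scan; objective: faster.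


-- ===== PORT A =====
def find_divisor_sum (number : Int) : Int :=
  (PySem.List.pyRange 1 number).foldl
    (fun sum1 i => if PySem.Int.mod number i == 0 then sum1 + i else sum1) 0

def find_amicable_pairs (number : Int) : List (List Int) :=
  let list_of_sum := (PySem.List.pyRange 1 (number + 1)).map (fun i => find_divisor_sum i)
  (PySem.List.pyRange 1 number).foldl
    (fun pairs i =>
      -- index i satisfies 1 ≤ i < number = len(list_of_sum), and the second lookup is
      -- guarded by i+1 < temp ≤ number, so both subscripts are always in range
      let temp := PySem.List.pyGetD list_of_sum i 0
      if 1 ≤ temp ∧ i + 1 < temp ∧ temp ≤ number ∧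
          PySem.List.pyGetD list_of_sum (temp - 1) 0 == i + 1
      then pairs ++ [[i + 1, temp]] else pairs) []

-- ===== PORT B =====
def find_amicable_pairs_alt (number : Int) : List (List Int) :=
  if number < 1 then []
  else
    let sums :=
      (PySem.List.pyRange 1 (PySem.Int.floordiv number 2 + 1)).foldl
        (fun sums d =>
          (PySem.List.pyRange (2 * d) (number + 1) d).foldl
            (fun s m => PySem.List.pySetD s m (PySem.List.pyGetD s m 0 + d)) sums)
        (List.replicate (number + 1).toNat 0)
    (PySem.List.pyRange 2 (number + 1)).foldl
      (fun pairs a =>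
        let s := PySem.List.pyGetD sums a 0
        if a < s ∧ s ≤ number ∧ PySem.List.pyGetD sums s 0 == a
        then pairs ++ [[a, s]] else pairs) []

-- ===== PRECONDITION & SPEC =====
def Spec_find_amicable_pairs (number : Int) (out : List (List Int)) : Prop := out = find_amicable_pairs_alt number
instance (number : Int) (out : List (List Int)) : Decidable (Spec_find_amicable_pairs number out) := by unfold Spec_find_amicable_pairs; infer_instance

-- ===== CLAIM (what is proved, stated in full; the proofs are below) =====
def Claim_equal_find_amicable_pairs : Prop := ∀ (number : Int), Dom_find_amicable_pairs number → Spec_find_amicable_pairs number (find_amicable_pairs number)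

-- ===== LEMMAS AND PROOFS =====

-- empty range
lemma pvRange_nil {a b : Int} (h : b ≤ a) : PySem.List.pyRange a b = [] := by
  rw [PySem.List.pyRange_of_pos a b (by norm_num)]
  simp [if_neg (by omega : ¬ a < b)]

-- a positive-step range has no duplicates
lemma pvRange_nodup (a b s : Int) (hs : 0 < s) : (PySem.List.pyRange a b s).Nodup := by
  rw [PySem.List.pyRange_of_pos a b hs]
  refine List.Nodup.map ?_ List.nodup_range
  intro k1 k2 hk
  have h2 : s * (k1 : Int) = s * k2 := add_left_cancel hk
  exact_mod_cast mul_left_cancel₀ (ne_of_gt hs) h2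

lemma pvCount_pyRange (a b s x : Int) (hs : 0 < s) :
    (PySem.List.pyRange a b s).count x = if a ≤ x ∧ x < b ∧ s ∣ x - a then 1 else 0 := by
  by_cases hmem : x ∈ PySem.List.pyRange a b s
  · rw [if_pos ((PySem.List.mem_pyRange_iff_of_pos hs x).mp hmem)]
    exact List.count_eq_one_of_mem (pvRange_nodup a b s hs) hmem
  · rw [if_neg (fun h => hmem ((PySem.List.mem_pyRange_iff_of_pos hs x).mpr h))]
    exact List.count_eq_zero.mpr hmem

-- reading a cell after writing a cell
lemma pvGetD_setD (s : List Int) (x m v : Int) (hx0 : 0 ≤ x) (hx : x < (s.length : Int))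
    (hm0 : 0 ≤ m) (_hm : m < (s.length : Int)) :
    PySem.List.pyGetD (PySem.List.pySetD s x v) m 0 =
      if m = x then v else PySem.List.pyGetD s m 0 := by
  rw [show x = ((x.toNat : Nat) : Int) by omega, show m = ((m.toNat : Nat) : Int) by omega,
    PySem.List.pyGetD_pySetD_natCast s x.toNat m.toNat v 0 (by omega)]
  exact if_congr ⟨by omega, by omega⟩ rfl rfl

-- the inner sieve loop adds d to every listed (in-range, duplicate-counted) cell
lemma pvFoldl_addAt (d : Int) : ∀ (l : List Int) (s : List Int),
    (∀ x ∈ l, 0 ≤ x ∧ x < (s.length : Int)) →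
    ((l.foldl (fun s m => PySem.List.pySetD s m (PySem.List.pyGetD s m 0 + d)) s).length = s.length ∧
     ∀ m : Int, 0 ≤ m → m < (s.length : Int) →
       PySem.List.pyGetD (l.foldl (fun s m => PySem.List.pySetD s m (PySem.List.pyGetD s m 0 + d)) s) m 0
         = PySem.List.pyGetD s m 0 + d * l.count m) := by
  intro l
  induction l with
  | nil => intro s _; exact ⟨rfl, fun m _ _ => by simp⟩
  | cons x tl ih =>
    intro s hb
    have hx := hb x (List.mem_cons_self)
    have hlen : (PySem.List.pySetD s x (PySem.List.pyGetD s x 0 + d)).length = s.length :=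
      PySem.List.length_pySetD s x _
    have hb' : ∀ y ∈ tl, 0 ≤ y ∧ y < ((PySem.List.pySetD s x (PySem.List.pyGetD s x 0 + d)).length : Int) := by
      intro y hy; rw [hlen]; exact hb y (List.mem_cons_of_mem _ hy)
    obtain ⟨ihlen, ihget⟩ := ih _ hb'
    constructor
    · simpa [hlen] using ihlen
    · intro m hm0 hm
      rw [List.foldl_cons, ihget m hm0 (by rw [hlen]; exact_mod_cast hm),
        pvGetD_setD s x m _ hx.1 hx.2 hm0 hm]
      by_cases hmx : m = x
      · subst hmx
        rw [if_pos rfl, List.count_cons_self]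
        push_cast; ring
      · rw [if_neg hmx, List.count_cons_of_ne (Ne.symm hmx)]

-- find_divisor_sum as a filtered sum
lemma pvFds_eq (m : Int) :
    find_divisor_sum m =
      ((PySem.List.pyRange 1 m).filter (fun i => PySem.Int.mod m i == 0)).sum := by
  unfold find_divisor_sum
  rw [PySem.List.foldl_if_eq_foldl_filter (fun i => PySem.Int.mod m i == 0) (fun s i => s + i),
    PySem.List.foldl_add _ (fun x => x)]
  simp

-- sum of filter as sum of a 0-padded map
lemma pvSum_filter (l : List Int) (p : Int → Bool) :
    (l.filter p).sum = (l.map (fun x => if p x then x else 0)).sum := by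
  induction l with
  | nil => rfl
  | cons a t ih => by_cases h : p a <;> simp [h, ih]

-- a proper divisor is at most half
lemma pvDvd_half {d m : Int} (hd : 1 ≤ d) (hdm : d < m) (hdvd : d ∣ m) : 2 * d ≤ m := by
  obtain ⟨c, hc⟩ := hdvd
  have hc2 : 2 ≤ c := by nlinarith
  nlinarith

-- the sieve's per-cell total is exactly A's trial-division divisor sum
lemma pvSieve_sum_eq (number m : Int) (hn : 1 ≤ number) (h1 : 1 ≤ m) (hm : m ≤ number) :
    ((PySem.List.pyRange 1 (PySem.Int.floordiv number 2 + 1)).map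
        (fun d => if d ∣ m ∧ 2 * d ≤ m then d else 0)).sum = find_divisor_sum m := by
  have hfd : ∀ q : Int, q ≤ PySem.Int.floordiv number 2 ↔ q * 2 ≤ number :=
    fun q => PySem.Int.le_floordiv_iff_mul_le (by norm_num)
  have hfd0 : 0 ≤ PySem.Int.floordiv number 2 := (hfd 0).mpr (by omega)
  set N : Int := max (PySem.Int.floordiv number 2 + 1) m with hN
  have htail : ∀ K : Int, 1 ≤ K → K ≤ N →
      (∀ d : Int, K ≤ d → ¬ (d ∣ m ∧ 2 * d ≤ m)) →
      ((PySem.List.pyRange 1 K).map (fun d => if d ∣ m ∧ 2 * d ≤ m then d else 0)).sum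
        = ((PySem.List.pyRange 1 N).map (fun d => if d ∣ m ∧ 2 * d ≤ m then d else 0)).sum := by
    intro K hK1 hKN hzero
    have hz : (List.map (fun d => if d ∣ m ∧ 2 * d ≤ m then d else 0)
        (PySem.List.pyRange K N)).sum = 0 := by
      apply List.sum_eq_zero
      intro x hx
      obtain ⟨d, hd, rfl⟩ := List.mem_map.mp hx
      obtain ⟨hd1, _⟩ := PySem.List.mem_pyRange_one.mp hd
      exact if_neg (hzero d hd1)
    rw [PySem.List.pyRange_one_append 1 K N hK1 hKN, List.map_append, List.sum_append,
      hz, add_zero]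
  have e1 := htail (PySem.Int.floordiv number 2 + 1) (by omega) (le_max_left _ _)
    (fun d hd hcon => by
      have : d ≤ PySem.Int.floordiv number 2 := (hfd d).mpr (by omega)
      omega)
  have e2 := htail m h1 (le_max_right _ _)
    (fun d hd hcon => by omega)
  rw [e1, ← e2, pvFds_eq, pvSum_filter]
  refine congrArg List.sum (List.map_congr_left ?_)
  intro d hd
  obtain ⟨hd1, hd2⟩ := PySem.List.mem_pyRange_one.mp hd
  by_cases hdvd : d ∣ m
  · rw [if_pos ⟨hdvd, pvDvd_half hd1 hd2 hdvd⟩,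
      if_pos (by simpa [PySem.Int.mod_eq_zero_iff_dvd] using hdvd)]
  · rw [if_neg (fun h => hdvd h.1),
      if_neg (by simpa [PySem.Int.mod_eq_zero_iff_dvd] using hdvd)]

-- invariant of the outer sieve loop
lemma pvOuter_inv (number : Int) (hn : 1 ≤ number) (t : Nat) :
    (((PySem.List.pyRange 1 (t : Int)).foldl
        (fun sums d =>
          (PySem.List.pyRange (2 * d) (number + 1) d).foldl
            (fun s m => PySem.List.pySetD s m (PySem.List.pyGetD s m 0 + d)) sums)
        (List.replicate (number + 1).toNat 0)).length = (number + 1).toNat) ∧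
    ∀ m : Int, 0 ≤ m → m ≤ number →
      PySem.List.pyGetD
        ((PySem.List.pyRange 1 (t : Int)).foldl
          (fun sums d =>
            (PySem.List.pyRange (2 * d) (number + 1) d).foldl
              (fun s m => PySem.List.pySetD s m (PySem.List.pyGetD s m 0 + d)) sums)
          (List.replicate (number + 1).toNat 0)) m 0
        = ((PySem.List.pyRange 1 (t : Int)).map
            (fun d => if d ∣ m ∧ 2 * d ≤ m then d else 0)).sum := by
  have hinit : ∀ m : Int, 0 ≤ m → m ≤ number →
      PySem.List.pyGetD (List.replicate (number + 1).toNat (0 : Int)) m 0 = 0 := by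
    intro m hm0 hm
    rw [PySem.List.pyGetD_eq_getElem _ _ hm0 (by simp; omega)]
    simp
  induction t with
  | zero =>
    rw [Nat.cast_zero, pvRange_nil (by norm_num : (0:Int) ≤ 1), List.foldl_nil]
    exact ⟨by simp, fun m hm0 hm => by rw [hinit m hm0 hm]; simp⟩
  | succ t ih =>
    by_cases ht : (t : Int) < 1
    · rw [show ((t + 1 : Nat) : Int) = 1 by omega, pvRange_nil (le_refl 1), List.foldl_nil]
      exact ⟨by simp, fun m hm0 hm => by rw [hinit m hm0 hm]; simp⟩
    · have h1t : 1 ≤ (t : Int) := by omega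
      obtain ⟨ihlen, ihget⟩ := ih
      rw [show ((t + 1 : Nat) : Int) = (t : Int) + 1 by push_cast; ring,
        PySem.List.pyRange_one_succ_right h1t, List.foldl_append, List.foldl_cons,
        List.foldl_nil]
      have hb : ∀ x ∈ PySem.List.pyRange (2 * (t : Int)) (number + 1) (t : Int),
          0 ≤ x ∧ x < ((((PySem.List.pyRange 1 (t : Int)).foldl
            (fun sums d =>
              (PySem.List.pyRange (2 * d) (number + 1) d).foldl
                (fun s m => PySem.List.pySetD s m (PySem.List.pyGetD s m 0 + d)) sums)
            (List.replicate (number + 1).toNat 0)).length : Int)) := by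
        intro x hx
        obtain ⟨hx1, hx2, _⟩ := (PySem.List.mem_pyRange_iff_of_pos (by omega) x).mp hx
        rw [ihlen]
        omega
      obtain ⟨alen, aget⟩ := pvFoldl_addAt (t : Int) _ _ hb
      refine ⟨by rw [alen, ihlen], ?_⟩
      intro m hm0 hm
      rw [aget m hm0 (by rw [ihlen]; omega), ihget m hm0 hm,
        pvCount_pyRange (2 * (t : Int)) (number + 1) (t : Int) m (by omega),
        List.map_append, List.sum_append]
      simp only [List.map_cons, List.map_nil, List.sum_cons, List.sum_nil, add_zero]
      congr 1
      by_cases hP : (t : Int) ∣ m ∧ 2 * (t : Int) ≤ m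
      · rw [if_pos ⟨hP.2, by omega, by
            have h2 : (t : Int) ∣ 2 * (t : Int) := dvd_mul_left _ _
            exact dvd_sub hP.1 h2⟩, if_pos hP]
        simp
      · rw [if_neg (fun h => hP ⟨by
            have h2 : (t : Int) ∣ 2 * (t : Int) := dvd_mul_left _ _
            have := dvd_add h.2.2 h2
            simpa using this, h.1⟩), if_neg hP]
        simp

-- the fully built sieve table reads back find_divisor_sum
lemma pvSieve_getD (number : Int) (hn : 1 ≤ number) (m : Int) (h0 : 0 ≤ m) (hm : m ≤ number) :
    PySem.List.pyGetD
      ((PySem.List.pyRange 1 (PySem.Int.floordiv number 2 + 1)).foldl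
        (fun sums d =>
          (PySem.List.pyRange (2 * d) (number + 1) d).foldl
            (fun s m => PySem.List.pySetD s m (PySem.List.pyGetD s m 0 + d)) sums)
        (List.replicate (number + 1).toNat 0)) m 0 = find_divisor_sum m := by
  have hfd0 : 0 ≤ PySem.Int.floordiv number 2 :=
    (PySem.Int.le_floordiv_iff_mul_le (by norm_num)).mpr (by omega : (0:Int) * 2 ≤ number)
  have h := (pvOuter_inv number hn ((PySem.Int.floordiv number 2 + 1).toNat)).2 m h0 hm
  rw [show (((PySem.Int.floordiv number 2 + 1).toNat : Nat) : Int)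
      = PySem.Int.floordiv number 2 + 1 by omega] at h
  rw [h]
  by_cases hm1 : 1 ≤ m
  · exact pvSieve_sum_eq number m hn hm1 hm
  · have hm0 : m = 0 := by omega
    subst hm0
    rw [List.sum_eq_zero, pvFds_eq, pvRange_nil (by norm_num : (0:Int) ≤ 1)]
    · rfl
    · intro x hx
      obtain ⟨d, hd, rfl⟩ := List.mem_map.mp hx
      obtain ⟨hd1, _⟩ := PySem.List.mem_pyRange_one.mp hd
      exact if_neg (fun hcon => by omega)

-- the amicable condition both loops test, and the canonical pair list
def pvOk (number a : Int) : Bool :=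
  decide (a < find_divisor_sum a ∧ find_divisor_sum a ≤ number ∧
    find_divisor_sum (find_divisor_sum a) = a)

def pvCanon (number : Int) : List (List Int) :=
  ((PySem.List.pyRange 2 (number + 1)).filter (pvOk number)).map
    (fun a => [a, find_divisor_sum a])

lemma pvRange_shift (n : Int) :
    PySem.List.pyRange 2 (n + 1) = (PySem.List.pyRange 1 n).map (fun i => i + 1) := by
  rw [PySem.List.pyRange_of_pos 2 (n + 1) (by norm_num),
    PySem.List.pyRange_of_pos 1 n (by norm_num), List.map_map]
  rw [show (if (2:Int) < n + 1 then ((n + 1 - 2 + 1 - 1) / 1).toNat else 0)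
      = (if (1:Int) < n then ((n - 1 + 1 - 1) / 1).toNat else 0) by split_ifs <;> omega]
  exact (List.map_congr_left (fun k _ => by simp; ring)).symm

lemma pvA_eq_canon (number : Int) : find_amicable_pairs number = pvCanon number := by
  simp only [find_amicable_pairs]
  rw [PySem.List.foldl_congr_mem _ _
    (fun pairs i => if pvOk number (i + 1)
      then pairs ++ [[i + 1, find_divisor_sum (i + 1)]] else pairs) _ ?_]
  · rw [PySem.List.foldl_append_if (fun i => pvOk number (i + 1))
      (fun i => [i + 1, find_divisor_sum (i + 1)]), List.nil_append, pvCanon,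
      pvRange_shift, List.filter_map, List.map_map]
    rfl
  · intro acc i hi
    obtain ⟨hi1, hi2⟩ := PySem.List.mem_pyRange_one.mp hi
    have hget : PySem.List.pyGetD
        ((PySem.List.pyRange 1 (number + 1)).map (fun i => find_divisor_sum i)) i 0
        = find_divisor_sum (i + 1) := by
      rw [show i = ((i.toNat : Nat) : Int) by omega,
        PySem.List.pyGetD_map_pyRange_one (fun i => find_divisor_sum i) 1 (number + 1)
          i.toNat 0 (by omega)]
      congr 1
      omega
    dsimp only
    rw [hget]
    by_cases hc : i + 1 < find_divisor_sum (i + 1) ∧ find_divisor_sum (i + 1) ≤ number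
    · have hget2 : PySem.List.pyGetD
          ((PySem.List.pyRange 1 (number + 1)).map (fun i => find_divisor_sum i))
          (find_divisor_sum (i + 1) - 1) 0
          = find_divisor_sum (find_divisor_sum (i + 1)) := by
        rw [show find_divisor_sum (i + 1) - 1
            = (((find_divisor_sum (i + 1) - 1).toNat : Nat) : Int) by omega,
          PySem.List.pyGetD_map_pyRange_one (fun i => find_divisor_sum i) 1 (number + 1)
            _ 0 (by omega)]
        congr 1
        omega
      rw [hget2]
      refine if_congr ?_ rfl rfl
      simp only [pvOk, beq_iff_eq, decide_eq_true_eq]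
      exact ⟨fun ⟨_, h2, h3, h4⟩ => ⟨h2, h3, h4⟩, fun ⟨h2, h3, h4⟩ => ⟨by omega, h2, h3, h4⟩⟩
    · rw [if_neg (fun h => hc ⟨h.2.1, h.2.2.1⟩), if_neg (by
        simp only [pvOk, decide_eq_true_eq]
        exact fun h => hc ⟨h.1, h.2.1⟩)]

lemma pvB_eq_canon (number : Int) (hn : 1 ≤ number) :
    find_amicable_pairs_alt number = pvCanon number := by
  rw [find_amicable_pairs_alt, if_neg (by omega : ¬ number < 1)]
  have hs := pvSieve_getD number hn
  rw [PySem.List.foldl_congr_mem _ _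
    (fun pairs a => if pvOk number a
      then pairs ++ [[a, find_divisor_sum a]] else pairs) _ ?_]
  · rw [PySem.List.foldl_append_if (pvOk number) (fun a => [a, find_divisor_sum a]),
      List.nil_append, pvCanon]
  · intro acc a ha
    obtain ⟨ha1, ha2⟩ := PySem.List.mem_pyRange_one.mp ha
    dsimp only
    rw [hs a (by omega) (by omega)]
    by_cases hc : a < find_divisor_sum a ∧ find_divisor_sum a ≤ number
    · rw [hs (find_divisor_sum a) (by omega) (by omega)]
      refine if_congr ?_ rfl rfl
      simp only [pvOk, beq_iff_eq, decide_eq_true_eq]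
    · rw [if_neg (fun h => hc ⟨h.1, h.2.1⟩), if_neg (by
        simp only [pvOk, decide_eq_true_eq]
        exact fun h => hc ⟨h.1, h.2.1⟩)]

-- ===== VERDICT (by name: the statement is the Claim_ definition above) =====
theorem find_amicable_pairs_spec : Claim_equal_find_amicable_pairs := by
  intro number _
  unfold Spec_find_amicable_pairs
  by_cases h1 : number < 1
  · rw [find_amicable_pairs_alt, if_pos h1, find_amicable_pairs,
      pvRange_nil (by omega : number ≤ 1), List.foldl_nil]
  · rw [pvA_eq_canon, pvB_eq_canon number (by omega)]
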